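-- pv_equiv track=rewrite | github.com/sudoxnym/connectd | deep.py | is_mastodon_handle
-- ===== SOURCE A (Python) =====
-- MASTODON_INSTANCES = [
--     'mastodon.social', 'fosstodon.org', 'hachyderm.io', 'tech.lgbt',
--     'social.coop', 'masto.ai', 'infosec.exchange', 'hackers.town',
--     'chaos.social', 'mathstodon.xyz', 'scholar.social', 'mas.to',
--     'mstdn.social', 'mastodon.online', 'universeodon.com', 'mastodon.world',
-- ]
--
-- def is_mastodon_handle(email):
--     """check if string looks like mastodon handle not email"""
--     if not email or '@' not in email:
--         return False
--     email_lower = email.lower()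
--     # check for @username@instance pattern
--     parts = email_lower.split('@')
--     if len(parts) == 3 and parts[0] == '':  # @user@instance
--         return True
--     if len(parts) == 2:
--         # check if domain is known mastodon instance
--         domain = parts[1]
--         for instance in MASTODON_INSTANCES:
--             if domain == instance or domain.endswith('.' + instance):
--                 return True
--         # also check common patterns
--         if 'mastodon' in domain or 'masto' in domain:
--             return True
--     return False
-- ===== SOURCE B (Python) =====
-- MASTODON_INSTANCES = [
--     'mastodon.social', 'fosstodon.org', 'hachyderm.io', 'tech.lgbt',
--     'social.coop', 'masto.ai', 'infosec.exchange', 'hackers.town',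
--     'chaos.social', 'mathstodon.xyz', 'scholar.social', 'mas.to',
--     'mstdn.social', 'mastodon.online', 'universeodon.com', 'mastodon.world',
-- ]
--
-- MASTODON_SET = frozenset(MASTODON_INSTANCES)
--
--
-- def _dot_suffixes(domain):
--     # the domain itself, then every segment following a '.'
--     yield domain
--     for i, ch in enumerate(domain):
--         if ch == '.':
--             yield domain[i + 1:]
--
--
-- def is_mastodon_handle(email):
--     """check if string looks like mastodon handle not email"""
--     if not email or '@' not in email:
--         return False
--     parts = email.lower().split('@')
--     if len(parts) == 3 and parts[0] == '':  # @user@instance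
--         return True
--     if len(parts) == 2:
--         domain = parts[1]
--         # a known instance matches iff it is a dot-boundary suffix of the domain
--         if any(seg in MASTODON_SET for seg in _dot_suffixes(domain)):
--             return True
--         # 'mastodon' in domain implies 'masto' in domain, so one check suffices
--         return 'masto' in domain
--     return False
-- ===== Notes on version B (the rewrite author's own statement) =====
-- stated objective: alternative
-- what changed: The len==2 branch now enumerates the domain's dot-boundary suffix segments and looks each up in a frozenset of the instances (and folds the redundant 'mastodon' substring check into 'masto'), instead of scanning the 16-element instance list with ==/endswith per element.
import Mathlib
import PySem

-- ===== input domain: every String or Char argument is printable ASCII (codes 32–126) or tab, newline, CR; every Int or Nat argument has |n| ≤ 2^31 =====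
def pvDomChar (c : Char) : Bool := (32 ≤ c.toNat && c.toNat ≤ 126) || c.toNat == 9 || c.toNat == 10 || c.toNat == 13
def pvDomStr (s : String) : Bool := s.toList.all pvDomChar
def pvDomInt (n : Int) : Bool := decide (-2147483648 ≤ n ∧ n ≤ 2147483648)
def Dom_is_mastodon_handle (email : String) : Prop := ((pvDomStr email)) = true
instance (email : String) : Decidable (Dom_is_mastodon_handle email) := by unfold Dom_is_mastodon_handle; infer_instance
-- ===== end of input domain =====

-- B replaces A's scan of the instance list (==/endswith per element) by looking up the
-- domain's dot-boundary suffix segments in a set of the instances (objective: alternative).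

-- ===== PORT A =====
def mastodonInstances : List (List Char) :=
  ["mastodon.social".toList, "fosstodon.org".toList, "hachyderm.io".toList, "tech.lgbt".toList,
   "social.coop".toList, "masto.ai".toList, "infosec.exchange".toList, "hackers.town".toList,
   "chaos.social".toList, "mathstodon.xyz".toList, "scholar.social".toList, "mas.to".toList,
   "mstdn.social".toList, "mastodon.online".toList, "universeodon.com".toList, "mastodon.world".toList]

-- the 'for instance in MASTODON_INSTANCES: … return True' loop of A
def aInstLoop (domain : List Char) : List (List Char) → Bool
  | [] => false
  | inst :: rest =>
      if domain == inst || PySem.Chars.endswith domain ('.' :: inst) then true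
      else aInstLoop domain rest

def is_mastodon_handle (email : String) : Bool :=
  if email == "" || !PySem.Str.isIn "@" email then false
  else
    let email_lower := PySem.Chars.lower email.toList
    let parts := PySem.Chars.splitOn email_lower "@".toList
    if parts.length == 3 && PySem.List.pyGetD parts 0 [] == [] then true
    else if parts.length == 2 then
      let domain := PySem.List.pyGetD parts 1 []
      if aInstLoop domain mastodonInstances then true
      else if PySem.Chars.isIn "mastodon".toList domain || PySem.Chars.isIn "masto".toList domain then true
      else false
    else false

-- ===== PORT B =====
def mastodonSet : PySem.Set (List Char) := PySem.Set.ofList mastodonInstances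

-- _dot_suffixes: the segments after each '.' (the 'for i, ch in enumerate' part)
def dotSuffixesAux : List Char → List (List Char)
  | [] => []
  | c :: rest => (if c == '.' then [rest] else []) ++ dotSuffixesAux rest

-- _dot_suffixes: the domain itself, then every segment following a '.'
def dotSuffixes (domain : List Char) : List (List Char) :=
  domain :: dotSuffixesAux domain

def is_mastodon_handle_alt (email : String) : Bool :=
  if email == "" || !PySem.Str.isIn "@" email then false
  else
    let email_lower := PySem.Chars.lower email.toList
    let parts := PySem.Chars.splitOn email_lower "@".toList
    if parts.length == 3 && PySem.List.pyGetD parts 0 [] == [] then true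
    else if parts.length == 2 then
      let domain := PySem.List.pyGetD parts 1 []
      if (dotSuffixes domain).any (fun seg => PySem.Set.contains mastodonSet seg) then true
      else PySem.Chars.isIn "masto".toList domain
    else false

-- ===== PRECONDITION & SPEC =====
def Spec_is_mastodon_handle (email : String) (out : Bool) : Prop := out = is_mastodon_handle_alt email
instance (email : String) (out : Bool) : Decidable (Spec_is_mastodon_handle email out) := by unfold Spec_is_mastodon_handle; infer_instance

-- ===== CLAIM (what is proved, stated in full; the proofs are below) =====
def Claim_equal_is_mastodon_handle : Prop := ∀ (email : String), Dom_is_mastodon_handle email → Spec_is_mastodon_handle email (is_mastodon_handle email)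

-- ===== LEMMAS AND PROOFS =====

-- A's loop is an 'any' over the instance list
theorem aInstLoop_eq_any (domain : List Char) (L : List (List Char)) :
    aInstLoop domain L
      = L.any (fun inst => domain == inst || PySem.Chars.endswith domain ('.' :: inst)) := by
  induction L with
  | nil => rfl
  | cons inst rest ih =>
      simp only [aInstLoop, List.any_cons, ← ih]
      split_ifs with h
      · simp [h]
      · simp [h]

-- the dot-suffix segments of d are exactly the s with '.'::s a suffix of d
theorem mem_dotSuffixesAux (d s : List Char) :
    s ∈ dotSuffixesAux d ↔ ('.' :: s) <:+ d := by
  induction d with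
  | nil => simp [dotSuffixesAux]
  | cons c rest ih =>
      simp only [dotSuffixesAux, List.mem_append, ih, List.suffix_cons_iff]
      constructor
      · rintro (h | h)
        · split_ifs at h with hc
          · simp only [List.mem_singleton] at h
            subst h
            exact Or.inl (by simp at hc; simp [hc])
          · simp at h
        · exact Or.inr h
      · rintro (h | h)
        · cases h
          simp
        · exact Or.inr h

theorem mem_dotSuffixes (d s : List Char) :
    s ∈ dotSuffixes d ↔ s = d ∨ ('.' :: s) <:+ d := by
  simp [dotSuffixes, mem_dotSuffixesAux]

-- B's set lookup over the suffix segments coincides with A's scan of the list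
theorem any_dotSuffixes_eq (d : List Char) :
    (dotSuffixes d).any (fun seg => PySem.Set.contains mastodonSet seg)
      = mastodonInstances.any
          (fun inst => d == inst || PySem.Chars.endswith d ('.' :: inst)) := by
  rw [Bool.eq_iff_iff]
  simp only [List.any_eq_true, Bool.or_eq_true, beq_iff_eq,
    PySem.Chars.endswith_iff, PySem.Set.contains_iff, mastodonSet, PySem.Set.mem_ofList,
    mem_dotSuffixes]
  constructor
  · rintro ⟨s, hseg, hmem⟩
    rcases hseg with rfl | hsuf
    · exact ⟨s, hmem, Or.inl rfl⟩
    · exact ⟨s, hmem, Or.inr hsuf⟩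
  · rintro ⟨j, hmem, hj⟩
    rcases hj with rfl | hsuf
    · exact ⟨d, Or.inl rfl, hmem⟩
    · exact ⟨j, Or.inr hsuf, hmem⟩

-- 'mastodon' in d implies 'masto' in d
theorem isIn_mastodon_imp (d : List Char) :
    PySem.Chars.isIn "mastodon".toList d = true → PySem.Chars.isIn "masto".toList d = true := by
  intro h
  rw [PySem.Chars.isIn_iff_infix] at h ⊢
  exact List.IsInfix.trans ⟨[], "don".toList, rfl⟩ h

-- ===== VERDICT (by name: the statement is the Claim_ definition above) =====
-- the whole len(parts) == 2 branch of A equals that of B, for any domain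
theorem branch_eq (d : List Char) :
    (if aInstLoop d mastodonInstances then true
     else if PySem.Chars.isIn "mastodon".toList d || PySem.Chars.isIn "masto".toList d then true
     else false)
    = (if (dotSuffixes d).any (fun seg => PySem.Set.contains mastodonSet seg) then true
       else PySem.Chars.isIn "masto".toList d) := by
  rw [aInstLoop_eq_any, any_dotSuffixes_eq]
  split
  · rfl
  · cases hm : PySem.Chars.isIn "mastodon".toList d
    · cases hmas : PySem.Chars.isIn "masto".toList d <;> simp
    · simp
      exact isIn_mastodon_imp d hm

-- ===== VERDICT (by name: the statement is the Claim_ definition above) =====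
theorem is_mastodon_handle_spec : Claim_equal_is_mastodon_handle := by
  intro email _
  show is_mastodon_handle email = is_mastodon_handle_alt email
  simp only [is_mastodon_handle, is_mastodon_handle_alt]
  split
  · rfl
  · split
    · rfl
    · split
      · exact branch_eq _
      · rfl
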